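-- pv_equiv track=rewrite | github.com/Artemka-dev/project_euler | problem_41.py | is_pan_number
-- ===== SOURCE A (Python) =====
-- def is_pan_number(number):
-- 	count = 0
-- 	mass = [int(i) for i in str(number)]
-- 	for i in range(min(mass), min(mass) + len(mass)):
-- 		# от минимального до минимального + длина массива
-- 		if i in mass:
-- 			count += 1
--
-- 	if count == len(mass):
-- 		return True
-- 	else:
-- 		return False
-- ===== SOURCE B (Python) =====
-- def is_pan_number(number):
--     digits = sorted(int(c) for c in str(number))
--     return digits == list(range(digits[0], digits[0] + len(digits)))
-- ===== Notes on version B (the rewrite author's own statement) =====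
-- stated objective: simpler
-- what changed: Replace the per-integer membership scan over the consecutive range (count == len) by sorting the digits once and structurally comparing the sorted list with list(range(min, min+len)).
import Mathlib
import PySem

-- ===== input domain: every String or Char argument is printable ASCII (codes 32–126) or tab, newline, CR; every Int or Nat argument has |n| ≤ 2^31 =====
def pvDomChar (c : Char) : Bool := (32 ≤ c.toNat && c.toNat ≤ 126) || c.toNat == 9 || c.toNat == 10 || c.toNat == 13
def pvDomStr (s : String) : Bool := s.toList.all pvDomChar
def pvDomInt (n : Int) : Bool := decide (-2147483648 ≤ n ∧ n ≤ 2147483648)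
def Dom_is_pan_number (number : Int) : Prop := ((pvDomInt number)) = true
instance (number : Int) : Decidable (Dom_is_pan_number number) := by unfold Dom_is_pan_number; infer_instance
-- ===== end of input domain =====

-- B replaces A's per-integer membership scan over the consecutive range by sorting the
-- digits once and comparing structurally with the range (objective: simpler).

-- shared digit extraction: [int(i) for i in str(number)] (both Pythons start this way);
-- int(c) via ofChars? (.getD 0 never fires under Pre_, where every char is a digit)
def pvDigits (number : Int) : List Int :=
  (PySem.Int.toChars number).map (fun c => (PySem.Int.ofChars? [c]).getD 0)

-- ===== PORT A =====
def is_pan_number (number : Int) : Bool :=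
  let mass := pvDigits number
  let m := (PySem.List.min? mass (fun x => x)).getD 0
  let count :=
    (PySem.List.pyRange m (m + PySem.List.len mass)).foldl
      (fun c i => if mass.contains i then c + 1 else c) (0 : Int)
  if count == PySem.List.len mass then true else false

-- ===== PORT B =====
def is_pan_number_alt (number : Int) : Bool :=
  let digits := PySem.List.sorted (pvDigits number) (fun x => x)
  digits == PySem.List.pyRange (PySem.List.pyGetD digits 0 0)
      (PySem.List.pyGetD digits 0 0 + PySem.List.len digits)

-- ===== PRECONDITION & SPEC =====
-- Python A raises ValueError on negative numbers (int('-')); B raises there too.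
def Pre_is_pan_number (number : Int) : Prop := 0 ≤ number
instance (number : Int) : Decidable (Pre_is_pan_number number) := by unfold Pre_is_pan_number; infer_instance
def pvWitness_is_pan_number : Int := (123)

def Spec_is_pan_number (number : Int) (out : Bool) : Prop := out = is_pan_number_alt number
instance (number : Int) (out : Bool) : Decidable (Spec_is_pan_number number out) := by unfold Spec_is_pan_number; infer_instance

-- ===== CLAIM (what is proved, stated in full; the proofs are below) =====
def Claim_equal_is_pan_number : Prop := ∀ (number : Int), Dom_is_pan_number number → Pre_is_pan_number number → Spec_is_pan_number number (is_pan_number number)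

-- ===== LEMMAS AND PROOFS =====

lemma pvDigits_ne_nil (n : Int) : pvDigits n ≠ [] := by
  unfold pvDigits PySem.Int.toChars
  split
  · simp
  · simpa using List.ne_nil_of_length_pos Nat.length_toDigits_pos

-- the core equivalence, over an arbitrary nonempty digit list
lemma pan_core (l : List Int) (hl : l ≠ []) :
    (let m := (PySem.List.min? l (fun x => x)).getD 0
     let count :=
       (PySem.List.pyRange m (m + PySem.List.len l)).foldl
         (fun c i => if l.contains i then c + 1 else c) (0 : Int)
     if count == PySem.List.len l then true else false)
    =
    (let digits := PySem.List.sorted l (fun x => x)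
     digits == PySem.List.pyRange (PySem.List.pyGetD digits 0 0)
        (PySem.List.pyGetD digits 0 0 + PySem.List.len digits)) := by
  -- name the min value
  obtain ⟨mv, hmv⟩ : ∃ mv, PySem.List.min? l (fun x => x) = some mv := by
    cases h : PySem.List.min? l (fun x => x) with
    | none => exact absurd ((PySem.List.min?_eq_none_iff l _).mp h) hl
    | some mv => exact ⟨mv, rfl⟩
  have hn : 0 < l.length := List.length_pos_iff.mpr hl
  simp only [hmv, Option.getD_some, PySem.List.len_eq, PySem.List.foldl_count_if, zero_add]
  set s := PySem.List.sorted l (fun x => x) with hs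
  have hsperm : s.Perm l := PySem.List.sorted_perm l _ _
  have hslen : s.length = l.length := PySem.List.length_sorted l _ _
  set R := PySem.List.pyRange mv (mv + (l.length : Int)) with hR
  have hRlen : R.length = l.length := by
    rw [hR, PySem.List.length_pyRange_one]; omega
  rw [Bool.eq_iff_iff]
  simp only [beq_iff_eq, Nat.cast_inj]
  constructor
  · -- A true → B true
    intro hcount
    have hcnt : List.countP (fun i => l.contains i) R = R.length := by
      have h1 : List.countP l.contains R = l.length := by simpa using hcount
      have h2 : List.countP (fun i => l.contains i) R = List.countP l.contains R := by
        congr 1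
      omega
    have hall : ∀ i ∈ R, l.contains i = true := List.countP_eq_length.mp hcnt
    have hsub : R ⊆ l := fun i hi => by simpa using hall i hi
    have hperm : R.Perm l :=
      (List.Nodup.subperm (by rw [hR]; exact PySem.List.nodup_pyRange_one _ _) hsub).perm_of_length_le
        (by omega)
    have hsR : s = R :=
      PySem.List.sorted_eq_of_perm_of_pairwise_lt l R (fun x => x) hperm
        (by rw [hR]; exact PySem.List.pairwise_lt_pyRange_one _ _)
    -- head of R is mv
    have hcons : R = mv :: PySem.List.pyRange (mv + 1) (mv + (l.length : Int)) 1 := by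
      rw [hR]; exact PySem.List.pyRange_one_cons (by omega)
    have hget : PySem.List.pyGetD s 0 0 = mv := by
      rw [PySem.List.pyGetD_zero, hsR, hcons]; rfl
    rw [hget, hsR, hRlen]
  · -- B true → A true
    intro hB
    have hslen' : (s.length : Int) = (l.length : Int) := by exact_mod_cast hslen
    have hBR : s = PySem.List.pyRange (PySem.List.pyGetD s 0 0)
        (PySem.List.pyGetD s 0 0 + (l.length : Int)) := by
      rw [← hslen']; exact hB
    set m0 := PySem.List.pyGetD s 0 0 with hm0
    -- m0 ∈ s
    have hm0mem : m0 ∈ s := by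
      rw [hBR]; exact PySem.List.mem_pyRange_one.mpr ⟨le_refl _, by omega⟩
    have hmin : ∀ y ∈ l, mv ≤ y := PySem.List.min?_isMin hmv
    have h1 : mv ≤ m0 := hmin m0 (hsperm.mem_iff.mp hm0mem)
    have h2 : m0 ≤ mv := by
      have : mv ∈ s := hsperm.mem_iff.mpr (PySem.List.min?_mem hmv)
      rw [hBR] at this
      exact (PySem.List.mem_pyRange_one.mp this).1
    have hm0mv : m0 = mv := le_antisymm h2 h1
    have hsR : s = R := by rw [hBR, hm0mv, hR]
    have hall : ∀ i ∈ R, l.contains i = true := fun i hi => by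
      simpa using hsperm.mem_iff.mp (by rw [hsR]; exact hi)
    have : List.countP (fun i => l.contains i) R = R.length := List.countP_eq_length.mpr hall
    rw [this, hRlen]
    simp

-- ===== VERDICT (by name: the statement is the Claim_ definition above) =====
theorem is_pan_number_spec : Claim_equal_is_pan_number := by
  intro number _ _
  unfold Spec_is_pan_number is_pan_number is_pan_number_alt
  exact pan_core (pvDigits number) (pvDigits_ne_nil number)
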